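-- pv_equiv track=rewrite | github.com/cgoliver/Euler | problem_2.py | evenfibsum
-- ===== SOURCE A (Python) =====
-- def evenfibsum(stop):
--     x = 1
--     y = 2
--
--     tot = 0
--
--     while x < stop:
--         if x % 2 == 0:
--             tot += x
--             yield tot
--         x, y = y, x + y
-- ===== SOURCE B (Python) =====
-- def _even_fibs_below(stop):
--     """List of even Fibonacci numbers < stop, via their own recurrence E' = 4*E + E_prev."""
--     evens = []
--     a, b = 2, 8
--     while a < stop:
--         evens.append(a)
--         a, b = b, 4 * b + a
--     return evens
--
--
-- def evenfibsum(stop):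
--     tot = 0
--     for e in _even_fibs_below(stop):
--         tot += e
--         yield tot
-- ===== Notes on version B (the rewrite author's own statement) =====
-- stated objective: alternative
-- what changed: B is staged: it first builds the list of even Fibonacci numbers below stop via the even-subsequence recurrence with no parity test, then yields its running prefix sums in a second pass; A fuses one scan over all Fibonacci numbers with a parity filter and the sum.
import Mathlib
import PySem

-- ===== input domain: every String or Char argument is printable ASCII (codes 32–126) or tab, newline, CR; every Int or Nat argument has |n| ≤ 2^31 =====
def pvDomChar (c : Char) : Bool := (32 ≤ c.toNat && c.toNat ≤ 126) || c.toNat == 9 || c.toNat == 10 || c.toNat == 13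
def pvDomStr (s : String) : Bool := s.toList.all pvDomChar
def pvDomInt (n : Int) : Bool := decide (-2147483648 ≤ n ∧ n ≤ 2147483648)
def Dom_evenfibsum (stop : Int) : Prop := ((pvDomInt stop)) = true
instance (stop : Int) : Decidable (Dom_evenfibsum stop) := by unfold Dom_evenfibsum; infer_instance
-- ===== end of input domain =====

-- B is a staged re-implementation: first the list of even Fibonacci numbers below stop
-- (their own recurrence 4*b + a, no parity test), then its running prefix sums.

-- ===== PORT A =====
-- A's while loop: state (x, y, tot); the proof arguments 0 < x, x < y only justify termination.
def evenfibsumLoopA (stop x y tot : Int) (hx : 0 < x) (hxy : x < y) : List Int :=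
  if _h : x < stop then
    if x % 2 = 0 then
      (tot + x) :: evenfibsumLoopA stop y (x + y) (tot + x) (by omega) (by omega)
    else
      evenfibsumLoopA stop y (x + y) tot (by omega) (by omega)
  else []
termination_by (stop - x).toNat
decreasing_by all_goals omega

def evenfibsum (stop : Int) : List Int :=
  evenfibsumLoopA stop 1 2 0 (by norm_num) (by norm_num)

-- ===== PORT B =====
-- stage 1: the even Fibonacci numbers below stop, via their own recurrence
def evenFibsBelow (stop a b : Int) (ha : 0 < a) (hab : a < b) : List Int :=
  if _h : a < stop then
    a :: evenFibsBelow stop b (4 * b + a) (by omega) (by omega)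
  else []
termination_by (stop - a).toNat
decreasing_by all_goals omega

-- stage 2: running prefix sums of a list, starting from tot
def prefixSums (tot : Int) : List Int → List Int
  | [] => []
  | e :: rest => (tot + e) :: prefixSums (tot + e) rest

def evenfibsum_alt (stop : Int) : List Int :=
  prefixSums 0 (evenFibsBelow stop 2 8 (by norm_num) (by norm_num))

-- ===== PRECONDITION & SPEC =====
def Spec_evenfibsum (stop : Int) (out : List Int) : Prop := out = evenfibsum_alt stop
instance (stop : Int) (out : List Int) : Decidable (Spec_evenfibsum stop out) := by unfold Spec_evenfibsum; infer_instance

-- ===== CLAIM (what is proved, stated in full; the proofs are below) =====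
def Claim_equal_evenfibsum : Prop := ∀ (stop : Int), Dom_evenfibsum stop → Spec_evenfibsum stop (evenfibsum stop)

-- ===== LEMMAS AND PROOFS =====

-- Key correspondence: from an even Fibonacci e followed by the odd f, A's loop
-- (which visits e, f, e+f, e+2f, …) yields exactly the prefix sums (from tot)
-- of the even list started at the consecutive even Fibonacci pair (e, e+2f).
theorem evenfibsum_loop_eq (n : ℕ) (stop e f tot : Int) (he : 0 < e) (hef : e < f)
    (hn : (stop - e).toNat ≤ n) (hpe : e % 2 = 0) (hpf : f % 2 = 1)
    (h1 : 0 < e) (h2 : e < e + 2 * f) :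
    evenfibsumLoopA stop e f tot he hef
      = prefixSums tot (evenFibsBelow stop e (e + 2 * f) h1 h2) := by
  induction n generalizing stop e f tot with
  | zero =>
    rw [evenfibsumLoopA, evenFibsBelow]
    have hns : ¬ e < stop := by omega
    rw [dif_neg hns, dif_neg hns]
    rfl
  | succ n ih =>
    rw [evenfibsumLoopA, evenFibsBelow]
    by_cases h : e < stop
    · rw [dif_pos h, dif_pos h, if_pos hpe, prefixSums]
      congr 1
      -- A now skips the two odd Fibonacci numbers f and e + f
      rw [evenfibsumLoopA]
      by_cases hf : f < stop
      · rw [dif_pos hf, if_neg (by omega : ¬ f % 2 = 0), evenfibsumLoopA]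
        by_cases hef2 : e + f < stop
        · rw [dif_pos hef2, if_neg (by omega : ¬ (e + f) % 2 = 0)]
          rw [ih stop (f + (e + f)) (e + f + (f + (e + f))) (tot + e)
            (by omega) (by omega) (by omega) (by omega) (by omega) (by omega) (by omega)]
          congr 2 <;> ring
        · -- e + f ≥ stop, so the next even value e + 2f ≥ stop: B's list ends too
          rw [dif_neg hef2, evenFibsBelow, dif_neg (by omega : ¬ e + 2 * f < stop)]
          rfl
      · rw [dif_neg hf, evenFibsBelow, dif_neg (by omega : ¬ e + 2 * f < stop)]
        rfl
    · rw [dif_neg h, dif_neg h]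
      rfl

-- ===== VERDICT (by name: the statement is the Claim_ definition above) =====
theorem evenfibsum_spec : Claim_equal_evenfibsum := by
  intro stop _
  unfold Spec_evenfibsum evenfibsum evenfibsum_alt
  rw [evenfibsumLoopA]
  by_cases h1 : (1 : Int) < stop
  · have h12 : ¬ (1 : Int) % 2 = 0 := by decide
    rw [dif_pos h1, if_neg h12]
    exact evenfibsum_loop_eq (stop - 2).toNat stop 2 3 0 (by norm_num) (by norm_num)
      (le_refl _) (by decide) (by decide) (by norm_num) (by norm_num)
  · rw [dif_neg h1, evenFibsBelow, dif_neg (by omega : ¬ (2 : Int) < stop)]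
    rfl
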